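-- pv_equiv track=rewrite | github.com/yashagarwalkdu25/Insufficient_Tokens | W3_MCP/mcp-server/src/cross_source/signal_normalizer.py | group_by_logical
-- ===== SOURCE A (Python) =====
-- from typing import Any
--
-- def group_by_logical(normalized: list[dict[str, Any]]) -> dict[str, list[dict[str, Any]]]:
--     g: dict[str, list[dict[str, Any]]] = {}
--     for r in normalized:
--         name = r["logical_name"]
--         if name == "unknown":
--             continue
--         g.setdefault(name, []).append(r)
--     return g
-- ===== SOURCE B (Python) =====
-- from typing import Any
--
-- def group_by_logical(normalized: list[dict[str, Any]]) -> dict[str, list[dict[str, Any]]]: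
--     # Two passes: collect the distinct non-"unknown" names in first-occurrence
--     # order, then build each group with a filter over the whole input.
--     keys: list[str] = []
--     for r in normalized:
--         n = r["logical_name"]
--         if n != "unknown" and n not in keys:
--             keys.append(n)
--     return {k: [r for r in normalized if r["logical_name"] == k] for k in keys}
-- ===== Notes on version B (the rewrite author's own statement) =====
-- stated objective: alternative
-- what changed: Replaces the single-pass setdefault-dict accumulation with a two-phase scheme: one pass collecting the distinct non-'unknown' names in first-occurrence order, then one filter over the whole input per key to materialize each group.
import Mathlib
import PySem

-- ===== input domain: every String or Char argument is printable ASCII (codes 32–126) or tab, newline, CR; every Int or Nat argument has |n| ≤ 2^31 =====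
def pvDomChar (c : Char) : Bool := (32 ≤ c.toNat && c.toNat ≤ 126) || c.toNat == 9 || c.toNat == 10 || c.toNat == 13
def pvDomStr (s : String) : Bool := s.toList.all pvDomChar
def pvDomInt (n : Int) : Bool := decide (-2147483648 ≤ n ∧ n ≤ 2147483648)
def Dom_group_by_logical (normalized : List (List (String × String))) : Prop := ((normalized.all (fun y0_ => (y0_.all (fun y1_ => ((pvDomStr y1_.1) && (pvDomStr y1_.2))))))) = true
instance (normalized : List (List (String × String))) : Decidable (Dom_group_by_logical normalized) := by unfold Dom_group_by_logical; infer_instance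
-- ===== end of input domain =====

-- B replaces the single-pass setdefault-dict grouping by a two-phase scheme
-- (collect distinct non-"unknown" names in first-occurrence order, then one
-- filter per key); same result, no speed claim.

-- ===== PORT A =====
-- r["logical_name"]: first-match lookup in the association list (exact for a
-- Python dict, whose keys are unique); the KeyError case (no such key) is
-- excluded by Pre_ below, so the "" default is never observed there.
def recGet (r : List (String × String)) : String :=
  (((r.find? (fun p => p.1 == "logical_name")).map Prod.snd).getD "")

def group_by_logical (normalized : List (List (String × String))) : List (String × List (List (String × String))) :=
  (normalized.foldl
    (fun g r =>
      let name := recGet r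
      if name == "unknown" then g
      else g.modify name [] (fun v => v ++ [r]))
    (PySem.Dict.empty : PySem.Dict String (List (List (String × String))))).items

-- ===== PORT B =====
def group_by_logical_alt (normalized : List (List (String × String))) : List (String × List (List (String × String))) :=
  let keys : List String := normalized.foldl
    (fun ks r =>
      let n := recGet r
      if n != "unknown" && !(ks.contains n) then ks ++ [n] else ks) []
  keys.map (fun k => (k, normalized.filter (fun r => recGet r == k)))

-- ===== PRECONDITION & SPEC =====
-- Pre_ excludes exactly the records without a "logical_name" key, on which the
-- Python A raises KeyError (B raises there too).
def Pre_group_by_logical (normalized : List (List (String × String))) : Prop :=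
  ∀ r ∈ normalized, (r.any (fun p => p.1 == "logical_name")) = true
instance (normalized : List (List (String × String))) : Decidable (Pre_group_by_logical normalized) := by unfold Pre_group_by_logical; infer_instance
def pvWitness_group_by_logical : (List (List (String × String))) :=
  [[("logical_name", "a"), ("v", "1")], [("logical_name", "unknown")], [("logical_name", "a")]]

def Spec_group_by_logical (normalized : List (List (String × String))) (out : List (String × List (List (String × String)))) : Prop := out = group_by_logical_alt normalized
instance (normalized : List (List (String × String))) (out : List (String × List (List (String × String)))) : Decidable (Spec_group_by_logical normalized out) := by unfold Spec_group_by_logical; infer_instance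

-- ===== CLAIM (what is proved, stated in full; the proofs are below) =====
def Claim_equal_group_by_logical : Prop := ∀ (normalized : List (List (String × String))), Dom_group_by_logical normalized → Pre_group_by_logical normalized → Spec_group_by_logical normalized (group_by_logical normalized)

-- ===== LEMMAS AND PROOFS =====

-- A's loop skips "unknown" records: it is the plain modify-loop over the filtered list.
theorem foldl_skip_unknown (l : List (List (String × String)))
    (g : PySem.Dict String (List (List (String × String)))) :
    l.foldl
      (fun g r =>
        let name := recGet r
        if name == "unknown" then g
        else g.modify name [] (fun v => v ++ [r])) g
    = (l.filter (fun r => !(recGet r == "unknown"))).foldl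
        (fun g r => g.modify (recGet r) [] (fun v => v ++ [r])) g := by
  induction l generalizing g with
  | nil => rfl
  | cons r t ih =>
    simp only [List.foldl_cons, List.filter_cons]
    by_cases h : (recGet r == "unknown") = true
    · rw [if_pos h, if_neg (by simp [h]), ih]
    · rw [if_neg h, if_pos (by simp [h]), List.foldl_cons, ih]

-- B's first loop computes the distinct non-"unknown" names: a PySem.Set build
-- over the filtered names.
theorem foldl_keys (l : List (List (String × String))) (ks : List String) :
    l.foldl
      (fun ks r =>
        let n := recGet r
        if n != "unknown" && !(ks.contains n) then ks ++ [n] else ks) ks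
    = ((l.filter (fun r => !(recGet r == "unknown"))).map recGet).foldl PySem.Set.add ks := by
  induction l generalizing ks with
  | nil => rfl
  | cons r t ih =>
    simp only [List.foldl_cons, List.filter_cons]
    by_cases h : (recGet r == "unknown") = true
    · have heq : recGet r = "unknown" := by simpa using h
      rw [if_neg (by simp [heq]), if_neg (by simp [heq]), ih]
    · have hne : recGet r ≠ "unknown" := by simpa using h
      have hb : (!(recGet r == "unknown")) = true := by simp [h]
      rw [if_pos hb, List.map_cons, List.foldl_cons]
      by_cases hc : recGet r ∈ ks
      · rw [if_neg (by simp [hc]), ih]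
        congr 1
        simp only [PySem.Set.add, PySem.Set.contains]
        simp [hc]
      · rw [if_pos (by simp [hne, hc]), ih]
        congr 1
        simp only [PySem.Set.add, PySem.Set.contains]
        simp [hc]

theorem main_eq (l : List (List (String × String))) :
    group_by_logical l = group_by_logical_alt l := by
  unfold group_by_logical group_by_logical_alt
  rw [foldl_skip_unknown, foldl_keys]
  set l' := l.filter (fun r => !(recGet r == "unknown")) with hl'
  have hfold :
      l'.foldl (fun g r => g.modify (recGet r) [] (fun v => v ++ [r]))
        (PySem.Dict.empty : PySem.Dict String (List (List (String × String))))
      = (l'.map (fun r => (recGet r, r))).foldl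
          (fun d p => d.modify p.1 [] (fun v => v ++ [p.2])) PySem.Dict.empty := by
    rw [List.foldl_map]
  rw [hfold]
  set D := (l'.map (fun r => (recGet r, r))).foldl
      (fun d p => d.modify p.1 [] (fun v => v ++ [p.2]))
      (PySem.Dict.empty : PySem.Dict String (List (List (String × String)))) with hD
  have hnd : D.keys.Nodup := by
    rw [hD]
    exact PySem.Dict.nodup_keys_foldl_modify_key _ _ _ _ _ (by simp [PySem.Dict.keys_empty])
  have hkeys : D.keys = PySem.Set.ofList (l'.map recGet) := by
    rw [hD, PySem.Dict.keys_foldl_modify_key, PySem.Dict.keys_empty, PySem.Set.ofList_eq_foldl,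
        PySem.Set.update, List.map_map]
    rfl
  have hset : ((l'.map recGet).foldl PySem.Set.add ([] : List String))
      = PySem.Set.ofList (l'.map recGet) := (PySem.Set.ofList_eq_foldl _).symm
  rw [PySem.Dict.items_eq_map_keys D hnd [], hkeys, hset]
  apply List.map_congr_left
  intro k hk
  have hkmem : k ∈ l'.map recGet := (PySem.Set.mem_ofList _ _).mp hk
  have hkne : ¬ (k == "unknown") = true := by
    obtain ⟨r, hr, hrk⟩ := List.mem_map.mp hkmem
    rw [hl'] at hr
    have hp := List.of_mem_filter hr
    subst hrk
    simpa using hp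
  have hgetD : D.getD k [] = l'.filter (fun r => recGet r == k) := by
    rw [hD, PySem.Dict.getD_foldl_modify_append, PySem.Dict.getD_empty, List.nil_append,
        List.filter_map, List.map_map]
    simp [Function.comp_def]
  rw [hgetD, hl', List.filter_filter]
  congr 1
  apply List.filter_congr
  intro r _
  have hk' : k ≠ "unknown" := by simpa using hkne
  by_cases hr : (recGet r == k) = true
  · have hrk : recGet r = k := by simpa using hr
    simp [hrk, hk']
  · simp [hr]

-- ===== VERDICT (by name: the statement is the Claim_ definition above) =====
theorem group_by_logical_spec : Claim_equal_group_by_logical := by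
  intro l _ _
  unfold Spec_group_by_logical
  exact main_eq l
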